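-- pv_equiv track=rewrite | github.com/MrGmo/codeWars-Python | 7kyu/all-inclusive.py | contain_all_rots
-- ===== SOURCE A (Python) =====
-- def contain_all_rots(st, arr):
--     if len(st) == 0:
--         return True
--     a = []
--     for i in range(len(st)):
--         st = list(st)
--         last = st.pop()
--         st.insert(0,last)
--         a.append(''.join(st))
--
--     for elem in a:
--         if elem in arr:
--             pass
--         else:
--             return False
--     return True
-- ===== SOURCE B (Python) =====
-- def contain_all_rots(st, arr):
--     n = len(st)
--     d = list(st) + list(st)
--     for i in range(n):
--         rot = ''.join(d[i:i+n])
--         if rot not in arr: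
--             return False
--     return True
-- ===== Notes on version B (the rewrite author's own statement) =====
-- stated objective: faster
-- what changed: B precomputes the doubled sequence st+st so each rotation is an independent contiguous slice-and-join, replacing A's per-iteration list(st)/pop/insert in-place rotation and its separately accumulated list scanned by a second loop; B also exits on the first missing rotation.
import Mathlib
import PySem

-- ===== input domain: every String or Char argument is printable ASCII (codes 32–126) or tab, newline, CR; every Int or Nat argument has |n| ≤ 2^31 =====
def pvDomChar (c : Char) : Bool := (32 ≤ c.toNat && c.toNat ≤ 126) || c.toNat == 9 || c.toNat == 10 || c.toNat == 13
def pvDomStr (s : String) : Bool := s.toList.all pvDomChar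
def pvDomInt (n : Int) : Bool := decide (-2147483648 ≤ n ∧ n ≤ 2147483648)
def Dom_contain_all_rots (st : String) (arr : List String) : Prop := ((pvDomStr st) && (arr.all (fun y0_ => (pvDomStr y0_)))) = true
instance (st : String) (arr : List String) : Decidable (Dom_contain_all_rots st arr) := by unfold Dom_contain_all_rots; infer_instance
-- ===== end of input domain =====

-- B builds the doubled sequence st+st and tests each contiguous window independently,
-- instead of A's mutable in-place rotation (pop/insert) accumulating a list scanned in a second loop.

-- ===== PORT A =====
-- st = list(st); last = st.pop(); st.insert(0, last)   (pop on [] never happens: the loop runs only when len(st) > 0)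
def pvRotrA (l : List Char) : List Char :=
  match l.getLast? with
  | none => l
  | some c => c :: l.dropLast

-- one iteration of A's first loop: rotate st and append ''.join(st) to a
def pvStepA (p : List Char × List String) (_ : Int) : List Char × List String :=
  let st := pvRotrA p.1
  (st, p.2 ++ [String.mk st])

-- A's second loop: for elem in a: if elem in arr: pass else: return False; return True
def pvCheckA (a : List String) (arr : List String) : Bool :=
  match a with
  | [] => true
  | e :: rest => if arr.contains e then pvCheckA rest arr else false

def contain_all_rots (st : String) (arr : List String) : Bool :=
  if st.toList.length == 0 then true
  else
    let r := (PySem.List.pyRange 0 (st.toList.length : Int) 1).foldl pvStepA (st.toList, [])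
    pvCheckA r.2 arr

-- ===== PORT B =====
-- B's loop: for i in range(n): rot = ''.join(d[i:i+n]); if rot not in arr: return False
def pvLoopB (d : List Char) (n : Int) (arr : List String) : List Int → Bool
  | [] => true
  | i :: rest =>
    if !(arr.contains (String.mk (PySem.List.slice d (some i) (some (i + n))))) then false
    else pvLoopB d n arr rest

def contain_all_rots_alt (st : String) (arr : List String) : Bool :=
  let n := st.toList.length
  let d := st.toList ++ st.toList
  pvLoopB d (n : Int) arr (PySem.List.pyRange 0 (n : Int) 1)

-- ===== PRECONDITION & SPEC =====
def Spec_contain_all_rots (st : String) (arr : List String) (out : Bool) : Prop := out = contain_all_rots_alt st arr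
instance (st : String) (arr : List String) (out : Bool) : Decidable (Spec_contain_all_rots st arr out) := by unfold Spec_contain_all_rots; infer_instance

-- ===== CLAIM (what is proved, stated in full; the proofs are below) =====
def Claim_equal_contain_all_rots : Prop := ∀ (st : String) (arr : List String), Dom_contain_all_rots st arr → Spec_contain_all_rots st arr (contain_all_rots st arr)

-- ===== LEMMAS AND PROOFS =====

-- one right-rotation of a left-rotated list, 1 ≤ m ≤ s.length
theorem pvRotrA_rot (s : List Char) (m : Nat) (h1 : 1 ≤ m) (h2 : m ≤ s.length) :
    pvRotrA (s.drop m ++ s.take m) = s.drop (m - 1) ++ s.take (m - 1) := by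
  obtain ⟨k, rfl⟩ : ∃ k, m = k + 1 := ⟨m - 1, by omega⟩
  have hk : k < s.length := by omega
  have htake : s.take (k + 1) = s.take k ++ [s[k]] := by
    rw [List.take_add_one]; simp [List.getElem?_eq_getElem hk]
  rw [htake, ← List.append_assoc]
  unfold pvRotrA
  rw [List.getLast?_concat, List.dropLast_concat]
  rw [Nat.add_sub_cancel, List.drop_eq_getElem_cons hk, List.cons_append]

-- A's first loop produces the successive right-rotations
theorem pvStepA_foldl (L : List Int) (t : List Char) (acc : List String) :
    (L.foldl pvStepA (t, acc)).2
      = acc ++ (List.range L.length).map (fun k => String.mk (pvRotrA^[k + 1] t)) := by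
  induction L generalizing t acc with
  | nil => simp
  | cons x L ih =>
      simp only [List.foldl_cons, pvStepA, ih, List.length_cons, List.range_succ_eq_map,
        List.map_cons, List.map_map]
      simp [Function.iterate_succ_apply, Function.comp_def, List.append_assoc]

-- iterated right-rotation is a left-rotation
theorem pvRotrA_iterate (s : List Char) (i : Nat) (hi : i ≤ s.length) (hs : s ≠ []) :
    pvRotrA^[i] s = s.drop (s.length - i) ++ s.take (s.length - i) := by
  induction i with
  | zero => simp
  | succ i ih =>
      rw [Function.iterate_succ_apply', ih (by omega),
        pvRotrA_rot s (s.length - i) (by have := List.length_pos_of_ne_nil hs; omega) (by omega)]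
      have he : s.length - i - 1 = s.length - (i + 1) := by omega
      rw [he]

theorem pvCheckA_all (a arr : List String) : pvCheckA a arr = a.all (fun e => arr.contains e) := by
  induction a with
  | nil => rfl
  | cons e rest ih => by_cases h : arr.contains e <;> simp [pvCheckA, ih]

theorem pvLoopB_all (d : List Char) (n : Int) (arr : List String) (L : List Int) :
    pvLoopB d n arr L = L.all (fun i => arr.contains (String.mk (PySem.List.slice d (some i) (some (i + n))))) := by
  induction L with
  | nil => rfl
  | cons i rest ih =>
      by_cases h : arr.contains (String.mk (PySem.List.slice d (some i) (some (i + n)))) <;>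
        simp [pvLoopB, ih]

-- a length-n window of the doubled list is a left-rotation
theorem pvSlice_doubled (s : List Char) (j : Nat) (hj : j ≤ s.length) :
    PySem.List.slice (s ++ s) (some (j : Int)) (some ((j : Int) + (s.length : Int))) = s.drop j ++ s.take j := by
  rw [PySem.List.slice_natCast_add (s ++ s) j s.length, List.drop_append, List.take_append]
  have h0 : j - s.length = 0 := by omega
  rw [h0, List.drop_zero, List.take_of_length_le (by simp), List.length_drop,
    Nat.sub_sub_self hj]

-- ===== VERDICT (by name: the statement is the Claim_ definition above) =====
theorem contain_all_rots_spec : Claim_equal_contain_all_rots := by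
  intro st arr _
  unfold Spec_contain_all_rots contain_all_rots contain_all_rots_alt
  by_cases hn : st.toList.length = 0
  · have hst : st.toList = [] := List.length_eq_zero_iff.mp hn
    rw [if_pos (by simp only [beq_iff_eq]; exact hn), hst]
    simp [pvLoopB, PySem.List.pyRange_one_eq_nil (le_refl (0 : Int))]
  · have hne : st.toList ≠ [] := fun he => hn (by rw [he]; rfl)
    rw [if_neg (by simp only [beq_iff_eq]; exact hn)]
    simp only [pvStepA_foldl, pvCheckA_all, pvLoopB_all,
      PySem.List.pyRange_one, Int.sub_zero, Int.toNat_natCast, List.nil_append, List.all_map,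
      Function.comp_def, zero_add, List.length_map, List.length_range]
    apply Bool.coe_iff_coe.mp
    simp only [List.all_eq_true, List.mem_range]
    constructor
    · intro h j hj
      rw [pvSlice_doubled st.toList j (le_of_lt hj)]
      have h2 := h (st.toList.length - (j + 1)) (by omega)
      rw [pvRotrA_iterate st.toList _ (by omega) hne,
        show st.toList.length - (st.toList.length - (j + 1) + 1) = j by omega] at h2
      exact h2
    · intro h k hk
      rw [pvRotrA_iterate st.toList _ (by omega) hne]
      have h2 := h (st.toList.length - (k + 1)) (by omega)
      rw [pvSlice_doubled st.toList _ (by omega)] at h2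
      exact h2
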